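-- pv_equiv track=rewrite | github.com/sharan-bevara/ExcelSheet_Genarator_Mutal_Fund | fund_rankings_app (2).py | get_plan_type
-- ===== SOURCE A (Python) =====
-- def get_plan_type(name):
--     n = str(name).lower()
--     is_direct = "direct" in n
--     is_growth = "growth" in n
--     is_idcw   = any(x in n for x in ["idcw", "dividend"])
--     if   is_direct and is_growth: return "Direct - Growth"
--     elif is_direct and is_idcw:   return "Direct - IDCW"
--     elif is_direct:               return "Direct - Other"
--     elif is_growth:               return "Regular - Growth"
--     elif is_idcw:                 return "Regular - IDCW"
--     else:                         return "Regular - Other"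
-- ===== SOURCE B (Python) =====
-- def get_plan_type(name):
--     n = str(name).lower()
--     prefix = "Direct" if "direct" in n else "Regular"
--     if "growth" in n:
--         suffix = "Growth"
--     elif any(x in n for x in ["idcw", "dividend"]):
--         suffix = "IDCW"
--     else:
--         suffix = "Other"
--     return f"{prefix} - {suffix}"
-- ===== Notes on version B (the rewrite author's own statement) =====
-- stated objective: simpler
-- what changed: B factors A's flat six-case branch into two independent classifications (prefix by direct-membership, suffix by growth/idcw priority) joined with the dash separator.
import Mathlib
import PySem

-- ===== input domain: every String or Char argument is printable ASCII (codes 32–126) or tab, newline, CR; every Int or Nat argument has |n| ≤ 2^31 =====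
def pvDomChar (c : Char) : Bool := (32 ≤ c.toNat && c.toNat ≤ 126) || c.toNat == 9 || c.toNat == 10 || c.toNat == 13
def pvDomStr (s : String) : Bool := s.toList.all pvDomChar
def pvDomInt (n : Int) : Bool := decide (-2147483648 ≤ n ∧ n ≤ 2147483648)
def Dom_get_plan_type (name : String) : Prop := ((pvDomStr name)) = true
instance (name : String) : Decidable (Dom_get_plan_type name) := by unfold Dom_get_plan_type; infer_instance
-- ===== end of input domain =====

-- B factors A's flat six-case branch into two independent axes (Direct/Regular prefix, Growth/IDCW/Other suffix); objective: simpler.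


-- ===== PORT A =====
def get_plan_type (name : String) : String :=
  let n := PySem.Str.lower name
  let is_direct := PySem.Str.isIn "direct" n
  let is_growth := PySem.Str.isIn "growth" n
  let is_idcw := (["idcw", "dividend"] : List String).any (fun x => PySem.Str.isIn x n)
  if is_direct && is_growth then "Direct - Growth"
  else if is_direct && is_idcw then "Direct - IDCW"
  else if is_direct then "Direct - Other"
  else if is_growth then "Regular - Growth"
  else if is_idcw then "Regular - IDCW"
  else "Regular - Other"

-- ===== PORT B =====
def get_plan_type_alt (name : String) : String :=
  let n := PySem.Str.lower name
  let prefix_ := if PySem.Str.isIn "direct" n then "Direct" else "Regular"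
  let suffix_ :=
    if PySem.Str.isIn "growth" n then "Growth"
    else if (["idcw", "dividend"] : List String).any (fun x => PySem.Str.isIn x n) then "IDCW"
    else "Other"
  prefix_ ++ " - " ++ suffix_

-- ===== PRECONDITION & SPEC =====
def Spec_get_plan_type (name : String) (out : String) : Prop := out = get_plan_type_alt name
instance (name : String) (out : String) : Decidable (Spec_get_plan_type name out) := by unfold Spec_get_plan_type; infer_instance

-- ===== CLAIM (what is proved, stated in full; the proofs are below) =====
def Claim_equal_get_plan_type : Prop := ∀ (name : String), Dom_get_plan_type name → Spec_get_plan_type name (get_plan_type name)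

-- ===== LEMMAS AND PROOFS =====

-- ===== VERDICT (by name: the statement is the Claim_ definition above) =====
lemma plan_key (d g i : Bool) :
    (if d && g then "Direct - Growth"
     else if d && i then "Direct - IDCW"
     else if d then "Direct - Other"
     else if g then "Regular - Growth"
     else if i then "Regular - IDCW"
     else "Regular - Other")
  = (if d then "Direct" else "Regular") ++ " - " ++
    (if g then "Growth" else if i then "IDCW" else "Other") := by
  cases d <;> cases g <;> cases i <;> rfl

theorem get_plan_type_spec : Claim_equal_get_plan_type := by
  intro name _
  exact plan_key _ _ _
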